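-- pv_equiv track=rewrite | github.com/Forward-UIUC-2021F/haoxiang-sun-keyword-deduplication | phrase_similarity.py | word2vec_format
-- ===== SOURCE A (Python) =====
-- def word2vec_format(phrase):
--     words = phrase.split()
--     ret = ""
--     for i in words:
--         subwords = i.split('-')
--         for s in subwords:
--             ret += s.lower()
--             ret += "_"
--     return ret[:-1]
-- ===== SOURCE B (Python) =====
-- def word2vec_format(phrase):
--     return '_'.join(phrase.split()).lower().replace('-', '_')
-- ===== Notes on version B (the rewrite author's own statement) =====
-- stated objective: idiomatic
-- what changed: Replaced A's nested loops that append each lowered subword plus a separator and then trim the trailing character by a single pipeline: join the whitespace-split words with underscores, lowercase, and map hyphens to underscores.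
import Mathlib
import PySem

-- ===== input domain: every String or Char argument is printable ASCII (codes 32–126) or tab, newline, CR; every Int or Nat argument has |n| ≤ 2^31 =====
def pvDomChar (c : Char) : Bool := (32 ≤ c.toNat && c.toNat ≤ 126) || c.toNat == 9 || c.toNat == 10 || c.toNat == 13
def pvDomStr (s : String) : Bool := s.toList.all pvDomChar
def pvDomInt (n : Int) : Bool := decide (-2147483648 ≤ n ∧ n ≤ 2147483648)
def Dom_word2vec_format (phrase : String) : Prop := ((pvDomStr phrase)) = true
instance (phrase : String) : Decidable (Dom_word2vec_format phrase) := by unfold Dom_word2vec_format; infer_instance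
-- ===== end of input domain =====

-- B replaces A's nested character-group loops by an idiomatic join / lower / replace pipeline; same return value.

-- ===== PORT A =====
-- literal port of A: split on whitespace, split each word on '-', append each lowered
-- subword plus '_' to the accumulator, finally drop the last character (ret[:-1])
def word2vec_format (phrase : String) : String :=
  let words := PySem.Chars.split₀ phrase.toList
  let ret := words.foldl (fun ret i =>
      (PySem.Chars.splitOn i ['-']).foldl (fun ret s =>
        ret ++ PySem.Chars.lower s ++ ['_']) ret) ([] : List Char)
  String.ofList (PySem.Chars.slice ret none (some (-1)))

-- ===== PORT B =====
-- literal port of B: '_'.join(phrase.split()).lower().replace('-', '_')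
def word2vec_format_alt (phrase : String) : String :=
  String.ofList (PySem.Chars.replace
    (PySem.Chars.lower (PySem.Chars.join ['_'] (PySem.Chars.split₀ phrase.toList)))
    ['-'] ['_'])

-- ===== PRECONDITION & SPEC =====
def Spec_word2vec_format (phrase : String) (out : String) : Prop := out = word2vec_format_alt phrase
instance (phrase : String) (out : String) : Decidable (Spec_word2vec_format phrase out) := by unfold Spec_word2vec_format; infer_instance

-- ===== CLAIM (what is proved, stated in full; the proofs are below) =====
def Claim_equal_word2vec_format : Prop := ∀ (phrase : String), Dom_word2vec_format phrase → Spec_word2vec_format phrase (word2vec_format phrase)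

-- ===== LEMMAS AND PROOFS =====

-- the character substitution performed by replace(s, "-", "_")
def pvSubst (c : Char) : Char := if c = '-' then '_' else c

-- replace with the one-character patterns "-" → "_" is the character-wise substitution
theorem replace_go_single (fuel : Nat) : ∀ (l acc : List Char), l.length ≤ fuel →
    PySem.Chars.replace.go ['-'] ['_'] fuel l acc = acc.reverse ++ l.map pvSubst := by
  induction fuel with
  | zero =>
    intro l acc h
    have : l = [] := List.eq_nil_of_length_eq_zero (Nat.le_zero.mp h)
    subst this; simp [PySem.Chars.replace.go]
  | succ n ih =>
    intro l acc h
    cases l with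
    | nil => simp [PySem.Chars.replace.go]
    | cons c t =>
      have ht : t.length ≤ n := Nat.lt_succ_iff.mp (by simpa using h)
      by_cases hc : c = '-'
      · subst hc
        have hpre : List.isPrefixOf ['-'] ('-' :: t) = true := by simp [List.isPrefixOf]
        simp only [PySem.Chars.replace.go, hpre, if_pos]
        rw [show List.drop (['-'] : List Char).length ('-' :: t) = t from rfl,
          show (['_'] : List Char).reverse ++ acc = '_' :: acc from rfl,
          ih t ('_' :: acc) ht]
        simp [pvSubst]
      · have hpre : List.isPrefixOf ['-'] (c :: t) = false := by
          simp [List.isPrefixOf]; exact fun h' => hc h'.symm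
        simp only [PySem.Chars.replace.go, hpre, Bool.false_eq_true, if_neg, not_false_iff]
        rw [ih t (c :: acc) ht]
        simp [pvSubst, hc]

theorem replace_single (l : List Char) :
    PySem.Chars.replace l ['-'] ['_'] = l.map pvSubst := by
  simp [PySem.Chars.replace]
  simpa using replace_go_single l.length l [] le_rfl

-- simple structural model of splitting on the single character '-':
-- returns (first piece, remaining pieces)
def pvSplit1 : List Char → List Char × List (List Char)
  | [] => ([], [])
  | c :: t =>
    if c = '-' then ([], (pvSplit1 t).1 :: (pvSplit1 t).2)
    else (c :: (pvSplit1 t).1, (pvSplit1 t).2)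

theorem splitOn_go_single (fuel : Nat) : ∀ (l cur : List Char) (acc : List (List Char)),
    l.length ≤ fuel →
    PySem.Chars.splitOn.go ['-'] fuel l cur acc =
      acc.reverse ++ (cur.reverse ++ (pvSplit1 l).1) :: (pvSplit1 l).2 := by
  induction fuel with
  | zero =>
    intro l cur acc h
    have : l = [] := List.eq_nil_of_length_eq_zero (Nat.le_zero.mp h)
    subst this; simp [PySem.Chars.splitOn.go, pvSplit1]
  | succ n ih =>
    intro l cur acc h
    cases l with
    | nil => simp [PySem.Chars.splitOn.go, pvSplit1]
    | cons c t =>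
      have ht : t.length ≤ n := Nat.lt_succ_iff.mp (by simpa using h)
      by_cases hc : c = '-'
      · subst hc
        have hpre : List.isPrefixOf ['-'] ('-' :: t) = true := by simp [List.isPrefixOf]
        simp only [PySem.Chars.splitOn.go, hpre, if_pos]
        rw [show List.drop (['-'] : List Char).length ('-' :: t) = t from rfl,
          ih t [] (cur.reverse :: acc) ht]
        simp [pvSplit1]
      · have hpre : List.isPrefixOf ['-'] (c :: t) = false := by
          simp [List.isPrefixOf]; exact fun h' => hc h'.symm
        simp only [PySem.Chars.splitOn.go, hpre, Bool.false_eq_true, if_neg, not_false_iff]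
        rw [ih t (c :: cur) acc ht]
        simp [pvSplit1, hc]

theorem splitOn_single (l : List Char) :
    PySem.Chars.splitOn l ['-'] = ((pvSplit1 l).1 :: (pvSplit1 l).2) := by
  simp [PySem.Chars.splitOn]
  simpa using splitOn_go_single (l.length + 1) l [] [] (Nat.le_succ _)

theorem lowerChar_fix_subst (c : Char) (hc : c ≠ '-') :
    pvSubst (PySem.Chars.lowerChar c) = PySem.Chars.lowerChar c := by
  simp only [pvSubst, PySem.Chars.lowerChar]
  split_ifs with h1 h2 <;> try rfl
  · exfalso
    simp only [PySem.Chars.isupper, Bool.and_eq_true, decide_eq_true_eq] at h1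
    have hA : 65 ≤ c.toNat := h1.1
    have hZ : c.toNat ≤ 90 := h1.2
    have hv : Nat.isValidChar (c.toNat + 32) := Or.inl (by omega)
    have h3 := congrArg Char.toNat h2
    rw [Char.toNat_ofNat, if_pos hv] at h3
    have h4 : ('-' : Char).toNat = 45 := rfl
    omega

-- core of A's inner loop, phrased on the pvSplit1 decomposition of the word
theorem inner_core (i : List Char) : ∀ (ret : List Char),
    ((pvSplit1 i).2).foldl (fun ret s => ret ++ PySem.Chars.lower s ++ ['_'])
        (ret ++ PySem.Chars.lower ((pvSplit1 i).1) ++ ['_'])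
      = ret ++ (PySem.Chars.lower i).map pvSubst ++ ['_'] := by
  induction i with
  | nil => intro ret; simp [pvSplit1, PySem.Chars.lower]
  | cons c t ih =>
    intro ret
    by_cases hc : c = '-'
    · subst hc
      simp only [pvSplit1]
      have := ih (ret ++ ['_'])
      simp only [PySem.Chars.lower, List.map_cons, List.append_assoc,
        List.singleton_append] at this ⊢
      rw [show pvSubst (PySem.Chars.lowerChar '-') = '_' from rfl] at *
      simpa using this
    · simp only [pvSplit1, if_neg hc]
      have := ih (ret ++ [PySem.Chars.lowerChar c])
      simp only [PySem.Chars.lower, List.map_cons, List.append_assoc,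
        List.singleton_append] at this ⊢
      rw [lowerChar_fix_subst c hc] at *
      simpa using this

-- A's inner loop over one word i: append lower(s) ++ "_" for each '-'-separated piece of i
theorem inner_loop_word (i ret : List Char) :
    (PySem.Chars.splitOn i ['-']).foldl (fun ret s => ret ++ PySem.Chars.lower s ++ ['_']) ret
      = ret ++ (PySem.Chars.lower i).map pvSubst ++ ['_'] := by
  rw [splitOn_single, List.foldl_cons]
  exact inner_core i ret

-- map over intercalate distributes (used for lower and for the '-'→'_' substitution)
theorem map_intercalate_char (f : Char → Char) (sep : List Char) (l : List (List Char)) :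
    (sep.intercalate l).map f = (sep.map f).intercalate (l.map (List.map f)) := by
  induction l with
  | nil => simp [List.intercalate]
  | cons a t ih =>
    cases t with
    | nil => simp [List.intercalate]
    | cons b t' =>
      simp only [List.intercalate, List.intersperse_cons₂, List.flatten_cons,
        List.map_append, List.map_cons] at ih ⊢
      simp [ih]

-- dropping the trailing '_' from the concatenation of "piece ++ '_'" blocks is the join
theorem dropLast_blocks (l : List (List Char)) (hl : l ≠ []) :
    (l.flatMap (fun p => p ++ ['_'])).dropLast = List.intercalate ['_'] l := by
  induction l with
  | nil => exact absurd rfl hl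
  | cons a t ih =>
    cases t with
    | nil => simp [List.intercalate]
    | cons b t' =>
      have hne : (b :: t').flatMap (fun p => p ++ ['_']) ≠ [] := by
        simp [List.flatMap]
      rw [List.flatMap_cons, List.dropLast_append_of_ne_nil hne, ih (by simp)]
      simp [List.intercalate, List.intersperse_cons₂]

-- ===== VERDICT (by name: the statement is the Claim_ definition above) =====
theorem word2vec_format_spec : Claim_equal_word2vec_format := by
  intro phrase _
  unfold Spec_word2vec_format word2vec_format word2vec_format_alt
  apply congrArg String.ofList
  generalize PySem.Chars.split₀ phrase.toList = ws
  -- A's outer loop: concatenate per-word blocks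
  have outer : ∀ (ret : List Char),
      ws.foldl (fun ret i =>
        (PySem.Chars.splitOn i ['-']).foldl (fun ret s =>
          ret ++ PySem.Chars.lower s ++ ['_']) ret) ret
      = ret ++ ws.flatMap (fun i => (PySem.Chars.lower i).map pvSubst ++ ['_']) := by
    intro ret
    rw [show (fun ret i => (PySem.Chars.splitOn i ['-']).foldl (fun ret s =>
          ret ++ PySem.Chars.lower s ++ ['_']) ret)
        = (fun ret i => ret ++ ((PySem.Chars.lower i).map pvSubst ++ ['_'])) from
      funext fun r => funext fun i => by rw [inner_loop_word]; simp]
    exact PySem.List.foldl_append_eq_flatMap _ ws ret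
  rw [outer, List.nil_append]
  -- B's pipeline
  rw [replace_single, PySem.Chars.join, PySem.Chars.lower, map_intercalate_char,
    map_intercalate_char]
  have hsep : (((['_'] : List Char).map PySem.Chars.lowerChar).map pvSubst) = ['_'] := by
    simp [PySem.Chars.lowerChar, PySem.Chars.isupper, pvSubst]
  rw [hsep]
  -- both sides are now about the same per-word blocks
  cases ws with
  | nil =>
    simp [PySem.List.slice, List.intercalate]
  | cons a t =>
    have hslice : PySem.Chars.slice
        ((a :: t).flatMap (fun i => (PySem.Chars.lower i).map pvSubst ++ ['_'])) none (some (-1))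
        = ((a :: t).flatMap (fun i => (PySem.Chars.lower i).map pvSubst ++ ['_'])).dropLast := by
      simp [pysem]
    rw [hslice]
    have hfm : (a :: t).flatMap (fun i => (PySem.Chars.lower i).map pvSubst ++ ['_'])
        = ((a :: t).map (fun i => (PySem.Chars.lower i).map pvSubst)).flatMap
            (fun p => p ++ ['_']) := by
      simp [List.flatMap_map]
    rw [hfm, dropLast_blocks _ (by simp)]
    simp [PySem.Chars.lower, List.map_map]
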